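-- pv_equiv track=rewrite | github.com/SergioAle210/Generate-Lex | regex_transform.py | escape_token_literals
-- ===== SOURCE A (Python) =====
-- def escape_token_literals(expr: str) -> str:
--     r"""
--     Busca en la expresión subcadenas entre comillas simples.
--     Si el contenido consiste en un solo carácter y es un operador especial (como +, *, (, )),
--     lo reemplaza por su versión escapada (por ejemplo, '+' se transforma en "\+").
--     """
--     result = ""
--     i = 0
--     while i < len(expr):
--         if expr[i] == "'":
--             j = expr.find("'", i + 1)
--             if j != -1:
--                 literal = expr[i + 1 : j]
--                 if len(literal) == 1 and literal in "+*()-/%":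
--                     result += "\\" + literal
--                 else:
--                     result += literal
--                 i = j + 1
--             else:
--                 result += expr[i]
--                 i += 1
--         elif expr[i] == '"':
--             j = expr.find('"', i + 1)
--             if j != -1:
--                 literal = expr[i + 1 : j]
--                 if literal:
--                     # Convierte el literal en una concatenación de caracteres
--                     transformed = literal[0]
--                     for ch in literal[1:]:
--                         transformed += "." + ch
--                     result += transformed
--                 else:
--                     # Literal vacío, lo interpretamos como epsilon (se puede representar con "_" u otro símbolo según convenga)
--                     result += "_"
--                 i = j + 1
--             else:
--                 result += expr[i]
--                 i += 1
--         else: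
--             result += expr[i]
--             i += 1
--     return result
-- ===== SOURCE B (Python) =====
-- def escape_token_literals(expr: str) -> str:
--     SPECIAL = "+*()-/%"
--     pieces = []
--     i, n = 0, len(expr)
--     while i < n:
--         # jump to the next quote of either kind; everything before it passes through verbatim
--         ks = [p for p in (expr.find("'", i), expr.find('"', i)) if p != -1]
--         if not ks:
--             pieces.append(expr[i:])
--             break
--         k = min(ks)
--         pieces.append(expr[i:k])
--         q = expr[k]
--         j = expr.find(q, k + 1)
--         if j == -1:
--             # unmatched quote: it passes through, keep scanning after it
--             pieces.append(q)
--             i = k + 1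
--             continue
--         lit = expr[k + 1 : j]
--         if q == "'":
--             pieces.append("\\" + lit if len(lit) == 1 and lit in SPECIAL else lit)
--         else:
--             pieces.append(".".join(lit) if lit else "_")
--         i = j + 1
--     return "".join(pieces)
-- ===== Notes on version B (the rewrite author's own statement) =====
-- stated objective: faster
-- what changed: Replaces A's character-by-character while-loop (which appends every plain character to the result individually) with a chunk-jumping scanner that uses str.find to jump directly to the next quote of either kind, emits each whole plain chunk as one slice, and expands double-quoted literals with a dot-join instead of a manual accumulator loop.
import Mathlib
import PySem

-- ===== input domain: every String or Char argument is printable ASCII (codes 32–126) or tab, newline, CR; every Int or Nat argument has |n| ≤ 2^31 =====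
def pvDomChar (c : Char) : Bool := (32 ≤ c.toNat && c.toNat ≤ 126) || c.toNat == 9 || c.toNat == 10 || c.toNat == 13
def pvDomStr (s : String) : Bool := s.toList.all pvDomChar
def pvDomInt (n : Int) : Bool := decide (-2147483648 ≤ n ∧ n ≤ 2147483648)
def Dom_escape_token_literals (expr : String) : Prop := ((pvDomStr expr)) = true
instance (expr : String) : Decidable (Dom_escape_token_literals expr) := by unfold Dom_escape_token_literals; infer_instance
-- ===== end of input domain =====

-- B replaces A's char-by-char scan by a chunk-jumping scanner: find the next quote of either kind,
-- emit the plain chunk before it in one piece, dot-join double-quoted literals; measured faster (constant factor).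

-- exact port of expr.find(c, s) for a single-character needle and 0 ≤ s ≤ len(expr):
-- first index ≥ s holding c (none = Python's -1); used by both Pythons via str.find
def pyFindChar (l : List Char) (c : Char) (s : Nat) : Option Nat :=
  ((l.drop s).findIdx? (· == c)).map (s + ·)

theorem pyFindChar_some_ge {l : List Char} {c : Char} {s j : Nat}
    (h : pyFindChar l c s = some j) : s ≤ j := by
  unfold pyFindChar at h
  rcases Option.map_eq_some_iff.mp h with ⟨k, _, hk⟩; omega

-- ===== PORT A =====
-- A scans one character at a time, maintaining result and index i
def aLoop (l : List Char) (res : List Char) (i : Nat) : List Char :=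
  if h : i < l.length then
    let c := l[i]!
    if c = '\'' then
      match hj : pyFindChar l '\'' (i+1) with
      | some j =>
        let lit := (l.drop (i+1)).take (j - (i+1))   -- expr[i+1:j], indices in range
        let piece := if lit.length = 1 && PySem.Chars.isIn lit "+*()-/%".toList
                     then '\\' :: lit else lit
        aLoop l (res ++ piece) (j+1)
      | none => aLoop l (res ++ [c]) (i+1)
    else if c = '"' then
      match hj : pyFindChar l '"' (i+1) with
      | some j =>
        let lit := (l.drop (i+1)).take (j - (i+1))
        let piece := match lit with
          | [] => ['_']
          | c0 :: rl => rl.foldl (fun acc ch => acc ++ ['.', ch]) [c0]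
        aLoop l (res ++ piece) (j+1)
      | none => aLoop l (res ++ [c]) (i+1)
    else aLoop l (res ++ [c]) (i+1)
  else res
termination_by l.length - i
decreasing_by
  all_goals first
  | (have := pyFindChar_some_ge hj; omega)
  | omega

def escape_token_literals (expr : String) : String :=
  String.ofList (aLoop expr.toList [] 0)

-- ===== PORT B =====
-- min over the finds that hit (Source B: min([p for p in (find1, find2) if p != -1]))
def minQ : Option Nat → Option Nat → Option Nat
  | none,   none   => none
  | some a, none   => some a
  | none,   some b => some b
  | some a, some b => some (min a b)

theorem minQ_some_ge {l : List Char} {i k : Nat}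
    (h : minQ (pyFindChar l '\'' i) (pyFindChar l '"' i) = some k) : i ≤ k := by
  unfold minQ at h
  cases c1 : pyFindChar l '\'' i with
  | none => cases c2 : pyFindChar l '"' i with
    | none => simp [c1, c2] at h
    | some b =>
      have hb : i ≤ b := by
        unfold pyFindChar at c2
        rcases Option.map_eq_some_iff.mp c2 with ⟨m, _, hm⟩; omega
      simp [c1, c2] at h; omega
  | some a =>
    have ha : i ≤ a := by
      unfold pyFindChar at c1
      rcases Option.map_eq_some_iff.mp c1 with ⟨m, _, hm⟩; omega
    cases c2 : pyFindChar l '"' i with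
    | none => simp [c1, c2] at h; omega
    | some b =>
      have hb : i ≤ b := by
        unfold pyFindChar at c2
        rcases Option.map_eq_some_iff.mp c2 with ⟨m, _, hm⟩; omega
      simp [c1, c2] at h; omega

-- B jumps from quote to quote, emitting whole plain chunks at once
def bGo (l : List Char) (i : Nat) : List Char :=
  if _h : i < l.length then
    match hk : minQ (pyFindChar l '\'' i) (pyFindChar l '"' i) with
    | none => l.drop i                                 -- no quote left: rest verbatim
    | some k =>
      let pre := (l.drop i).take (k - i)               -- expr[i:k]
      let q := l[k]!
      match hj : pyFindChar l q (k+1) with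
      | none => pre ++ [q] ++ bGo l (k+1)              -- unmatched quote passes through
      | some j =>
        let lit := (l.drop (k+1)).take (j - (k+1))     -- expr[k+1:j]
        let piece :=
          if q = '\'' then
            if lit.length = 1 && PySem.Chars.isIn lit "+*()-/%".toList
            then '\\' :: lit else lit
          else if lit.isEmpty then ['_'] else lit.intersperse '.'   -- ".".join(lit) / "_"
        pre ++ piece ++ bGo l (j+1)
  else []
termination_by l.length - i
decreasing_by
  · have := minQ_some_ge hk; omega
  · have h1 := minQ_some_ge hk
    have h2 : k + 1 ≤ j := by
      unfold pyFindChar at hj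
      rcases Option.map_eq_some_iff.mp hj with ⟨m, _, hm⟩; omega
    omega

def escape_token_literals_alt (expr : String) : String :=
  String.ofList (bGo expr.toList 0)

-- ===== PRECONDITION & SPEC =====
def Spec_escape_token_literals (expr : String) (out : String) : Prop := out = escape_token_literals_alt expr
instance (expr : String) (out : String) : Decidable (Spec_escape_token_literals expr out) := by unfold Spec_escape_token_literals; infer_instance

-- ===== CLAIM (what is proved, stated in full; the proofs are below) =====
def Claim_equal_escape_token_literals : Prop := ∀ (expr : String), Dom_escape_token_literals expr → Spec_escape_token_literals expr (escape_token_literals expr)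

-- ===== LEMMAS AND PROOFS =====

theorem pyFindChar_self (l : List Char) (c : Char) (s : Nat) (h : s < l.length)
    (hc : l[s]! = c) : pyFindChar l c s = some s := by
  unfold pyFindChar
  have hd : l.drop s = l[s] :: l.drop (s+1) := List.drop_eq_getElem_cons h
  have hb : l[s]! = l[s] := getElem!_pos l s h
  rw [hd, List.findIdx?_cons]
  simp [← hb, hc]

theorem pyFindChar_succ (l : List Char) (c : Char) (s : Nat) (h : s < l.length)
    (hc : l[s]! ≠ c) : pyFindChar l c s = pyFindChar l c (s+1) := by
  unfold pyFindChar
  have hd : l.drop s = l[s] :: l.drop (s+1) := List.drop_eq_getElem_cons h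
  have hb : l[s]! = l[s] := getElem!_pos l s h
  rw [hd, List.findIdx?_cons]
  have hf : (l[s] == c) = false := by rw [← hb]; exact beq_eq_false_iff_ne.mpr hc
  rw [hf]
  simp only [Bool.false_eq_true, if_false, Option.map_map]
  congr 1
  funext k
  simp only [Function.comp_apply]
  omega

-- the common per-literal piece both programs emit for a matched quote q around lit
def pieceOf (q : Char) (lit : List Char) : List Char :=
  if q = '\'' then
    if lit.length = 1 && PySem.Chars.isIn lit "+*()-/%".toList then '\\' :: lit else lit
  else if lit.isEmpty then ['_'] else lit.intersperse '.'

theorem pyFindChar_some_spec {l : List Char} {c : Char} {s j : Nat}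
    (h : pyFindChar l c s = some j) : j < l.length ∧ l[j]! = c := by
  unfold pyFindChar at h
  rcases Option.map_eq_some_iff.mp h with ⟨k, hk, hj⟩
  rcases List.findIdx?_eq_some_iff_getElem.mp hk with ⟨hlt, hp, _⟩
  have hlen : s + k < l.length := by
    have := l.length_drop (i := s); omega
  have : (l.drop s)[k] = l[s + k] := List.getElem_drop
  constructor
  · omega
  · rw [← hj, getElem!_pos l (s+k) hlen, ← this]
    exact (beq_iff_eq).mp hp

theorem minQ_quote (l : List Char) (i : Nat) (h : i < l.length)
    (hq : l[i]! = '\'' ∨ l[i]! = '"') :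
    minQ (pyFindChar l '\'' i) (pyFindChar l '"' i) = some i := by
  rcases hq with hq | hq
  · rw [pyFindChar_self l _ i h hq]
    cases h2 : pyFindChar l '"' i with
    | none => rfl
    | some b =>
      have := pyFindChar_some_ge h2
      simp [minQ, Nat.min_eq_left this]
  · rw [pyFindChar_self l _ i h hq]
    cases h2 : pyFindChar l '\'' i with
    | none => rfl
    | some a =>
      have := pyFindChar_some_ge h2
      simp [minQ, Nat.min_eq_right this]

theorem minQ_some_spec {l : List Char} {i k : Nat}
    (h : minQ (pyFindChar l '\'' i) (pyFindChar l '"' i) = some k) :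
    k < l.length ∧ (l[k]! = '\'' ∨ l[k]! = '"') := by
  unfold minQ at h
  cases c1 : pyFindChar l '\'' i with
  | none => cases c2 : pyFindChar l '"' i with
    | none => simp [c1, c2] at h
    | some b =>
      have := pyFindChar_some_spec c2
      simp [c1, c2] at h
      exact ⟨h ▸ this.1, Or.inr (h ▸ this.2)⟩
  | some a =>
    have ha := pyFindChar_some_spec c1
    cases c2 : pyFindChar l '"' i with
    | none =>
      simp [c1, c2] at h
      exact ⟨h ▸ ha.1, Or.inl (h ▸ ha.2)⟩
    | some b =>
      have hb := pyFindChar_some_spec c2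
      simp [c1, c2] at h
      rcases Nat.le_total a b with hab | hab
      · have : k = a := by omega
        exact ⟨this ▸ ha.1, Or.inl (this ▸ ha.2)⟩
      · have : k = b := by omega
        exact ⟨this ▸ hb.1, Or.inr (this ▸ hb.2)⟩

theorem bGo_none (l : List Char) (i : Nat)
    (h : minQ (pyFindChar l '\'' i) (pyFindChar l '"' i) = none) :
    bGo l i = l.drop i := by
  by_cases hi : i < l.length
  · rw [bGo]
    simp only [hi, dite_true]
    split
    · rfl
    · rename_i k hk
      rw [h] at hk; exact absurd hk (by simp)
  · rw [bGo]
    simp only [hi, dite_false]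
    exact (List.drop_eq_nil_of_le (Nat.le_of_not_lt hi)).symm

-- one evaluation step of bGo when a quote was found at k
theorem bGo_some (l : List Char) (i k : Nat) (hi : i < l.length)
    (hk : minQ (pyFindChar l '\'' i) (pyFindChar l '"' i) = some k) :
    bGo l i = (l.drop i).take (k - i) ++
      match pyFindChar l (l[k]!) (k+1) with
      | none => l[k]! :: bGo l (k+1)
      | some j => pieceOf (l[k]!) ((l.drop (k+1)).take (j - (k+1))) ++ bGo l (j+1) := by
  rw [bGo]
  simp only [hi, dite_true]
  split
  · rename_i hk'
    rw [hk'] at hk; exact absurd hk (by simp)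
  · rename_i k' hk'
    have : k' = k := Option.some.inj (hk'.symm.trans hk)
    subst this
    split
    · rename_i hj
      cases hfind : pyFindChar l (l[k']!) (k'+1) with
      | none => simp
      | some j => rw [hfind] at hj; exact absurd hj (by simp)
    · rename_i j hj
      cases hfind : pyFindChar l (l[k']!) (k'+1) with
      | none => rw [hfind] at hj; exact absurd hj (by simp)
      | some j' =>
        rw [hfind] at hj
        have : j' = j := Option.some.inj hj
        subst this
        simp [pieceOf, List.append_assoc]

-- bGo at a quote position: the chunk is empty and bGo does one literal step
theorem bGo_quote (l : List Char) (i : Nat) (h : i < l.length)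
    (hq : l[i]! = '\'' ∨ l[i]! = '"') :
    bGo l i = match pyFindChar l (l[i]!) (i+1) with
      | none => l[i]! :: bGo l (i+1)
      | some j => pieceOf (l[i]!) ((l.drop (i+1)).take (j - (i+1))) ++ bGo l (j+1) := by
  rw [bGo_some l i i h (minQ_quote l i h hq)]
  simp

-- bGo at a non-quote position emits exactly that character
theorem bGo_step (l : List Char) (i : Nat) (h : i < l.length)
    (h1 : l[i]! ≠ '\'') (h2 : l[i]! ≠ '"') :
    bGo l i = l[i]! :: bGo l (i+1) := by
  have e1 : pyFindChar l '\'' i = pyFindChar l '\'' (i+1) := pyFindChar_succ l _ i h h1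
  have e2 : pyFindChar l '"' i = pyFindChar l '"' (i+1) := pyFindChar_succ l _ i h h2
  have hd : l.drop i = l[i]! :: l.drop (i+1) := by
    rw [getElem!_pos l i h]; exact List.drop_eq_getElem_cons h
  cases hk : minQ (pyFindChar l '\'' (i+1)) (pyFindChar l '"' (i+1)) with
  | none =>
    rw [bGo_none l i (by rw [e1, e2]; exact hk), bGo_none l (i+1) hk, hd]
  | some k =>
    have h1k := minQ_some_ge hk
    rcases minQ_some_spec hk with ⟨hkl, _⟩
    have hi1 : i + 1 < l.length := by omega
    rw [bGo_some l i k h (by rw [e1, e2]; exact hk), bGo_some l (i+1) k hi1 hk]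
    have hpre : (l.drop i).take (k - i) = l[i]! :: (l.drop (i+1)).take (k - (i+1)) := by
      rw [hd]
      have : k - i = (k - (i+1)) + 1 := by omega
      rw [this, List.take_succ_cons]
    rw [hpre, List.cons_append]

-- A's manual accumulator loop for a double-quoted literal equals '.'-interspersion
theorem foldl_dots (t : List Char) : ∀ acc : List Char,
    t.foldl (fun acc ch => acc ++ ['.', ch]) acc = acc ++ t.flatMap (fun ch => ['.', ch]) := by
  induction t with
  | nil => intro acc; simp
  | cons c t ih =>
    intro acc
    simp only [List.foldl_cons, List.flatMap_cons, ih]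
    simp

theorem intersperse_dots (t : List Char) (c0 : Char) :
    (c0 :: t).intersperse '.' = c0 :: t.flatMap (fun ch => ['.', ch]) := by
  induction t generalizing c0 with
  | nil => simp
  | cons c1 t ih =>
    rw [List.intersperse_cons₂, ih c1]
    simp

theorem pieceA_dq (lit : List Char) :
    (match lit with
      | [] => ['_']
      | c0 :: rl => rl.foldl (fun acc ch => acc ++ ['.', ch]) [c0]) = pieceOf '"' lit := by
  cases lit with
  | nil => simp [pieceOf]
  | cons c0 rl =>
    simp only [pieceOf]
    rw [if_neg (by decide), if_neg (by simp)]
    rw [foldl_dots rl [c0], intersperse_dots rl c0]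
    simp

-- the main loop invariant: A's scan from i with accumulator res equals res ++ B's scan from i
theorem aLoop_eq_bGo (l : List Char) : ∀ (n i : Nat) (res : List Char),
    l.length ≤ n + i → aLoop l res i = res ++ bGo l i := by
  intro n
  induction n with
  | zero =>
    intro i res hn
    have h : ¬ i < l.length := by omega
    rw [aLoop, bGo]
    simp [h]
  | succ n ih =>
    intro i res hn
    by_cases h : i < l.length
    · by_cases hq1 : l[i]! = '\''
      · rw [aLoop]
        simp only [h, dite_true, if_pos hq1]
        rw [bGo_quote l i h (Or.inl hq1), hq1]
        split
        · rename_i j hj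
          have hij := pyFindChar_some_ge hj
          rw [ih (j+1) _ (by omega), hj]
          simp [pieceOf, List.append_assoc]
        · rename_i hj
          rw [ih (i+1) _ (by omega), hj]
          simp
      · by_cases hq2 : l[i]! = '"'
        · rw [aLoop]
          simp only [h, dite_true, if_neg hq1, if_pos hq2]
          rw [bGo_quote l i h (Or.inr hq2), hq2]
          split
          · rename_i j hj
            have hij := pyFindChar_some_ge hj
            rw [ih (j+1) _ (by omega), hj, pieceA_dq]
            simp [pieceOf, List.append_assoc]
          · rename_i hj
            rw [ih (i+1) _ (by omega), hj]
            simp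
        · rw [aLoop]
          simp only [h, dite_true, if_neg hq1, if_neg hq2]
          rw [ih (i+1) _ (by omega), bGo_step l i h hq1 hq2]
          simp
    · rw [aLoop, bGo]
      simp [h]

-- ===== VERDICT (by name: the statement is the Claim_ definition above) =====
theorem escape_token_literals_spec : Claim_equal_escape_token_literals := by
  intro expr _
  unfold Spec_escape_token_literals escape_token_literals escape_token_literals_alt
  rw [aLoop_eq_bGo expr.toList expr.toList.length 0 [] (by omega)]
  simp
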